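-- pv_equiv track=rewrite | github.com/chengchengwwc/YieldDemoFotPython | BinarySearch/demo2.py | bsearch_right_not_greater
-- ===== SOURCE A (Python) =====
-- from typing import List
--
-- def bsearch_right_not_greater(nums:List[int],target:int) -> int:
--
--     low,high = 0 ,len(nums) -1
--     while low <= high:
--         mid = low + (high-low)//2
--         if nums[mid] <= target:
--             low = mid + 1
--         else:
--             high = mid - 1
--     return high if high >0 else -1
-- ===== SOURCE B (Python) =====
-- from typing import List
--
-- def bsearch_right_not_greater(nums: List[int], target: int) -> int:
--     # Recursive decomposition on list segments: instead of moving low/high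
--     # pointers, recurse on the current segment (a slice) plus its offset.
--     # The loop always terminates with low == high + 1, so the final `high`
--     # is exactly offset - 1 when the segment becomes empty.
--     def rec(offset, seg):
--         if not seg:
--             return offset - 1
--         m = (len(seg) - 1) // 2  # same probe as low + (high-low)//2
--         if seg[m] <= target:
--             return rec(offset + m + 1, seg[m + 1:])
--         return rec(offset, seg[:m])
--     high = rec(0, nums)
--     return high if high > 0 else -1
-- ===== Notes on version B (the rewrite author's own statement) =====
-- stated objective: alternative
-- what changed: A's imperative while loop over low/high pointers is replaced by a recursive function over list segments (an offset plus a slice) that performs the identical probe sequence and returns offset-1 when the segment empties, since the loop always ends with low = high + 1.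
import Mathlib
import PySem

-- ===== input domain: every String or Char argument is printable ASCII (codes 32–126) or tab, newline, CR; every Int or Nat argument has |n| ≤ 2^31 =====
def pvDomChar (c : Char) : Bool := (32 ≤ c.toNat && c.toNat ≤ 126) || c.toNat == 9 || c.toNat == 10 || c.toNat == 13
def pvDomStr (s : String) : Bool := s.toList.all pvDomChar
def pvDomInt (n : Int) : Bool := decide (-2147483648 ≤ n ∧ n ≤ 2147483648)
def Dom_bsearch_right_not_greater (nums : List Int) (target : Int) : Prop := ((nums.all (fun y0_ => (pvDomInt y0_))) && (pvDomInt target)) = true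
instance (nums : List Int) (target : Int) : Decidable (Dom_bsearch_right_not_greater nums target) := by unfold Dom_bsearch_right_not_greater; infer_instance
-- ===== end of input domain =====

-- B replaces A's two-pointer while loop by a recursion on list segments (offset + slice);
-- objective: alternative decomposition, same probe sequence, not claimed faster.

-- ===== PORT A =====
-- A's while loop as tail recursion on the mutable state (low, high).
-- nums[mid] is provably in range whenever probed (0 ≤ low ≤ mid ≤ high < len), so pyGetD's default is never used.
def bsLoop (nums : List Int) (target : Int) (low high : Int) : Int :=
  if low ≤ high then
    let mid := low + PySem.Int.floordiv (high - low) 2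
    if PySem.List.pyGetD nums mid 0 ≤ target then
      bsLoop nums target (mid + 1) high
    else
      bsLoop nums target low (mid - 1)
  else high
termination_by (high + 1 - low).toNat
decreasing_by
  all_goals
    rw [PySem.Int.floordiv_eq_ediv_of_pos (by omega : (0:Int) < 2)] at *
    omega

def bsearch_right_not_greater (nums : List Int) (target : Int) : Int :=
  let high := bsLoop nums target 0 ((nums.length : Int) - 1)
  if high > 0 then high else -1

-- ===== PORT B =====
-- Source B's rec(offset, seg); m = (len(seg)-1)//2 is Nat division (len ≥ 1 in that branch), exact.
def bsRec (target : Int) (offset : Int) (seg : List Int) : Int :=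
  if _h : seg.isEmpty then offset - 1
  else
    let m : Nat := (seg.length - 1) / 2
    if PySem.List.pyGetD seg (m : Int) 0 ≤ target then
      bsRec target (offset + (m : Int) + 1) (PySem.List.slice seg (some ((m : Int) + 1)) none)
    else
      bsRec target offset (PySem.List.slice seg none (some (m : Int)))
termination_by seg.length
decreasing_by
  all_goals
    have hpos : 0 < seg.length := by
      cases seg with
      | nil => simp at _h
      | cons a t => simp
  · rw [show ((((seg.length - 1) / 2 : Nat) : Int) + 1) = (((seg.length - 1) / 2 + 1 : Nat) : Int) by
        push_cast; ring,
      PySem.List.slice_from_natCast]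
    simp only [List.length_drop]
    omega
  · rw [PySem.List.slice_to_natCast]
    simp only [List.length_take]
    omega

def bsearch_right_not_greater_alt (nums : List Int) (target : Int) : Int :=
  let high := bsRec target 0 nums
  if high > 0 then high else -1

-- ===== PRECONDITION & SPEC =====
def Spec_bsearch_right_not_greater (nums : List Int) (target : Int) (out : Int) : Prop := out = bsearch_right_not_greater_alt nums target
instance (nums : List Int) (target : Int) (out : Int) : Decidable (Spec_bsearch_right_not_greater nums target out) := by unfold Spec_bsearch_right_not_greater; infer_instance

-- ===== CLAIM (what is proved, stated in full; the proofs are below) =====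
def Claim_equal_bsearch_right_not_greater : Prop := ∀ (nums : List Int) (target : Int), Dom_bsearch_right_not_greater nums target → Spec_bsearch_right_not_greater nums target (bsearch_right_not_greater nums target)

-- ===== LEMMAS AND PROOFS =====

-- Core correspondence: rec(offset, seg) equals A's loop from (low, high) = (offset, offset + |seg| - 1),
-- whenever seg agrees elementwise with nums starting at offset.
theorem bsRec_eq_bsLoop (nums : List Int) (target : Int) :
    ∀ n (seg : List Int) (o : Nat), seg.length = n →
      (∀ i : Nat, i < seg.length → seg[i]? = nums[o + i]?) →
      bsRec target (o : Int) seg = bsLoop nums target (o : Int) ((o : Int) + (seg.length : Int) - 1) := by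
  intro n
  induction n using Nat.strong_induction_on with
  | _ n ih =>
    intro seg o hlen hagree
    by_cases hemp : seg = []
    · subst hemp
      rw [bsRec, bsLoop]
      simp
    · have hpos : 0 < seg.length := List.length_pos_of_ne_nil hemp
      set m : Nat := (seg.length - 1) / 2 with hm
      have hmlt : m < seg.length := by omega
      have hmid : (o : Int) + PySem.Int.floordiv (((o : Int) + (seg.length : Int) - 1) - (o : Int)) 2
          = ((o + m : Nat) : Int) := by
        rw [PySem.Int.floordiv_eq_ediv_of_pos (by omega : (0:Int) < 2)]
        push_cast
        omega
      have hval : PySem.List.pyGetD seg (m : Int) 0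
          = PySem.List.pyGetD nums ((o + m : Nat) : Int) 0 := by
        rw [PySem.List.pyGetD_natCast, PySem.List.pyGetD_natCast,
            List.getD_eq_getElem?_getD, List.getD_eq_getElem?_getD, hagree m hmlt]
      rw [bsRec, bsLoop]
      simp only [hemp, List.isEmpty_iff]
      rw [dif_neg (by simp)]
      rw [if_pos (by omega : (o : Int) ≤ (o : Int) + (seg.length : Int) - 1)]
      simp only [← hm]
      rw [hmid, ← hval]
      by_cases hc : PySem.List.pyGetD seg (m : Int) 0 ≤ target
      · rw [if_pos hc, if_pos hc]
        rw [show (((m : Nat) : Int) + 1) = (((m + 1 : Nat)) : Int) by push_cast; ring,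
            PySem.List.slice_from_natCast]
        have hih := ih (seg.length - (m + 1)) (by omega) (seg.drop (m + 1)) (o + (m + 1))
          (by simp)
          (by intro i hi
              rw [List.getElem?_drop]
              have hlt : m + 1 + i < seg.length := by simp at hi; omega
              rw [show o + (m + 1) + i = o + (m + 1 + i) by omega]
              exact hagree (m + 1 + i) hlt)
        convert hih using 2 <;> (simp only [List.length_drop]; push_cast; omega)
      · rw [if_neg hc, if_neg hc]
        rw [PySem.List.slice_to_natCast]
        have htk : (seg.take m).length = m := by simp; omega
        have hih := ih m (by omega) (seg.take m) o
          htk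
          (by intro i hi
              rw [htk] at hi
              rw [List.getElem?_take_of_lt hi, hagree i (by omega)])
        convert hih using 2
        rw [htk]
        push_cast
        omega

-- ===== VERDICT (by name: the statement is the Claim_ definition above) =====
theorem bsearch_right_not_greater_spec : Claim_equal_bsearch_right_not_greater := by
  intro nums target _
  unfold Spec_bsearch_right_not_greater bsearch_right_not_greater bsearch_right_not_greater_alt
  have h := bsRec_eq_bsLoop nums target nums.length nums 0 rfl
    (by intro i _; simp)
  rw [show ((0 : Nat) : Int) = (0 : Int) from rfl,
      show ((0 : Int) + (nums.length : Int) - 1) = ((nums.length : Int) - 1) by ring] at h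
  rw [h]
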